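-- pv_equiv track=rewrite | github.com/ishangote/Coding-Interviews-Python | CodeSignal/Arcade/The Core/Lineup.py | lineUp
-- ===== SOURCE A (Python) =====
-- def lineUp(commands):
--     a, b = 0, 0
--     ans = 0
--     for cmd in commands:
--         if cmd == 'A':
--             a += 2
--             b += 2
--
--         elif cmd == 'L':
--             a += 1
--             b -= 1
--             #Normalizing to keep b in range(3)
--             b += 4
--
--         else:
--             a -= 1
--             b += 1
--             a += 4
--
--         #More normalizing
--         a %= 4
--         b %= 4
--         if a == b: ans += 1
--
--     return ans
-- ===== SOURCE B (Python) =====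
-- def lineUp(commands):
--     # Alignment depends only on the parity of non-'A' commands seen so far:
--     # 'A' shifts both soldiers equally, while 'L'/any other command changes
--     # their relative orientation by 2 (mod 4), i.e. toggles alignment.
--     parity = 0
--     ans = 0
--     for cmd in commands:
--         if cmd != 'A':
--             parity = 1 - parity
--         if parity == 0:
--             ans += 1
--     return ans
-- ===== Notes on version B (the rewrite author's own statement) =====
-- stated objective: simpler
-- what changed: Replaces the two mod-4 position counters with a single alignment parity bit toggled on every non-'A' command, counting iterations where the parity is even; constant-factor speedup from doing one toggle instead of several additions and two mod operations per command.
import Mathlib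
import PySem

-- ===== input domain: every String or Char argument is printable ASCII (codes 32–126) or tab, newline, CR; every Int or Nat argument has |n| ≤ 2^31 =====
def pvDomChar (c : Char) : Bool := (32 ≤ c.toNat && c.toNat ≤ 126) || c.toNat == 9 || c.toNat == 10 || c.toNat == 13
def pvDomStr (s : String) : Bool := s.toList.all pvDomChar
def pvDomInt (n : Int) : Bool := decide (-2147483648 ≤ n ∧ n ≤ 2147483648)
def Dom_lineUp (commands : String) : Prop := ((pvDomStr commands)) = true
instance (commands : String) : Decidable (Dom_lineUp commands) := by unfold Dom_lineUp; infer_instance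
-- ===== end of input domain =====

-- B replaces A's two mod-4 position counters by a single alignment parity bit (simpler, same cost).

-- ===== PORT A =====
def lineUpStep (s : Int × Int × Int) (cmd : Char) : Int × Int × Int :=
  let a := s.1
  let b := s.2.1
  let ans := s.2.2
  let a1 := if cmd = 'A' then a + 2 else if cmd = 'L' then a + 1 else a - 1 + 4
  let b1 := if cmd = 'A' then b + 2 else if cmd = 'L' then b - 1 + 4 else b + 1
  let a2 := PySem.Int.mod a1 4
  let b2 := PySem.Int.mod b1 4
  (a2, b2, if a2 = b2 then ans + 1 else ans)

def lineUp (commands : String) : Int :=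
  (commands.toList.foldl lineUpStep (0, 0, 0)).2.2

-- ===== PORT B =====
def lineUpAltStep (s : Int × Int) (cmd : Char) : Int × Int :=
  let p := if cmd ≠ 'A' then 1 - s.1 else s.1
  (p, if p = 0 then s.2 + 1 else s.2)

def lineUp_alt (commands : String) : Int :=
  (commands.toList.foldl lineUpAltStep (0, 0)).2

-- ===== PRECONDITION & SPEC =====
def Spec_lineUp (commands : String) (out : Int) : Prop := out = lineUp_alt commands
instance (commands : String) (out : Int) : Decidable (Spec_lineUp commands out) := by unfold Spec_lineUp; infer_instance

-- ===== CLAIM (what is proved, stated in full; the proofs are below) =====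
def Claim_equal_lineUp : Prop := ∀ (commands : String), Dom_lineUp commands → Spec_lineUp commands (lineUp commands)

-- ===== LEMMAS AND PROOFS =====

-- Invariant: A's counters stay in [0,4) and their difference mod 4 is twice B's parity bit.
theorem lineUp_key (l : List Char) : ∀ (a b p ans : Int),
    0 ≤ a → a < 4 → 0 ≤ b → b < 4 → (p = 0 ∨ p = 1) → (a - b) % 4 = 2 * p →
    (l.foldl lineUpStep (a, b, ans)).2.2 = (l.foldl lineUpAltStep (p, ans)).2 := by
  induction l with
  | nil => intros; rfl
  | cons c t ih =>
    intro a b p ans ha0 ha4 hb0 hb4 hp hab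
    simp only [List.foldl_cons, lineUpStep, lineUpAltStep,
      PySem.Int.mod_eq_emod_of_pos (a := _) (show (0:Int) < 4 by norm_num)]
    by_cases hA : c = 'A'
    · simp only [hA, ne_eq, not_true_eq_false, if_false, if_true]
      rw [if_congr (show (a + 2) % 4 = (b + 2) % 4 ↔ p = 0 by omega) rfl rfl]
      exact ih _ _ p _ (by omega) (by omega) (by omega) (by omega) hp (by omega)
    · simp only [ne_eq, hA, not_false_eq_true, if_true, if_false]
      by_cases hL : c = 'L'
      · simp only [if_pos hL]
        rw [if_congr (show (a + 1) % 4 = (b - 1 + 4) % 4 ↔ 1 - p = 0 by omega) rfl rfl]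
        exact ih _ _ (1 - p) _ (by omega) (by omega) (by omega) (by omega)
          (by omega) (by omega)
      · simp only [if_neg hL]
        rw [if_congr (show (a - 1 + 4) % 4 = (b + 1) % 4 ↔ 1 - p = 0 by omega) rfl rfl]
        exact ih _ _ (1 - p) _ (by omega) (by omega) (by omega) (by omega)
          (by omega) (by omega)

-- ===== VERDICT (by name: the statement is the Claim_ definition above) =====
theorem lineUp_spec : Claim_equal_lineUp := by
  intro commands _
  unfold Spec_lineUp lineUp lineUp_alt
  exact lineUp_key commands.toList 0 0 0 0 (by norm_num) (by norm_num)
    (by norm_num) (by norm_num) (Or.inl rfl) (by norm_num)
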